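-- pv_equiv track=rewrite | github.com/wayneprice/AdventOfCode2020 | Day17.py | __copy_expand
-- ===== SOURCE A (Python) =====
-- def __copy_expand(dataset) :
--     new_dataset = [[[['.' for x in range(0, len(dataset[0][0][0]) + 2)] for y in range(0, len(dataset[0][0]) + 2)] for z in range(0, len(dataset[0]) + 2)] for w in range(0, len(dataset) + 2)]
--     for w in range(0, len(dataset)) :
--         for z in range(0, len(dataset[w])):
--             for y in range(0, len(dataset[w][z])) :
--                 for x in range(0, len(dataset[w][z][y])) :
--                     new_dataset[w+1][z+1][y+1][x+1] = dataset[w][z][y][x]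
--     return new_dataset
-- ===== SOURCE B (Python) =====
-- def __copy_expand(dataset):
--     W, Z = len(dataset), len(dataset[0])
--     Y, X = len(dataset[0][0]), len(dataset[0][0][0])
--
--     def cell(w, z, y, x):
--         if 0 <= w < len(dataset) and 0 <= z < len(dataset[w]) \
--                 and 0 <= y < len(dataset[w][z]) and 0 <= x < len(dataset[w][z][y]):
--             return dataset[w][z][y][x]
--         return '.'
--
--     return [[[[cell(w - 1, z - 1, y - 1, x - 1) for x in range(X + 2)]
--               for y in range(Y + 2)] for z in range(Z + 2)] for w in range(W + 2)]
-- ===== Notes on version B (the rewrite author's own statement) =====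
-- stated objective: simpler
-- what changed: B is a gather: one nested comprehension builds the padded grid directly, each output cell looking up its source cell when it exists and '.' otherwise, instead of A's allocate-a-full-dot-grid-then-overwrite-the-interior with four nested index loops; Pre_ excludes exactly the inputs on which A raises IndexError (empty dataset/dataset[0]/dataset[0][0], or a cell whose coordinates exceed the dimensions of dataset[0]).
import Mathlib
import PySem

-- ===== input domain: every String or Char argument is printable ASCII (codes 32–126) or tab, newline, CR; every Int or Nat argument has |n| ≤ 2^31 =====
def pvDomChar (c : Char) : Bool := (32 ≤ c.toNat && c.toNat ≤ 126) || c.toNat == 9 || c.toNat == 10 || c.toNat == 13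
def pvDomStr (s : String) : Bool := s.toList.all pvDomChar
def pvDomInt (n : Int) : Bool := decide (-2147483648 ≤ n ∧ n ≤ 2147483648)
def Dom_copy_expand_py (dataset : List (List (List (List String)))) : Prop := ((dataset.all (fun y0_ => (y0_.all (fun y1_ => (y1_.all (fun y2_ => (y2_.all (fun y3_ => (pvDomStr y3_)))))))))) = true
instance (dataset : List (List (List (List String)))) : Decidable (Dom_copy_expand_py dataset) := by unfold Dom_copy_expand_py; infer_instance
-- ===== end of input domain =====

-- ===== PORT A =====
-- B is a gather (one comprehension per output cell); A allocates a dot grid and scatters the input into its interior (objective: simpler).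
-- Python's `new_dataset[w+1][z+1][y+1][x+1] = v` on freshly built (unaliased) nested lists = functional nested modify/set:
def pvSet4 (nd : List (List (List (List String)))) (w z y x : Nat) (v : String) :
    List (List (List (List String))) :=
  nd.modify w (fun s => s.modify z (fun l => l.modify y (fun r => r.set x v)))

def copy_expand_py (dataset : List (List (List (List String)))) : List (List (List (List String))) :=
  let X := (((dataset.getD 0 []).getD 0 []).getD 0 []).length
  let Y := ((dataset.getD 0 []).getD 0 []).length
  let Z := (dataset.getD 0 []).length
  let init : List (List (List (List String))) :=
    (List.range (dataset.length + 2)).map (fun _ =>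
      (List.range (Z + 2)).map (fun _ =>
        (List.range (Y + 2)).map (fun _ =>
          (List.range (X + 2)).map (fun _ => "."))))
  (List.range dataset.length).foldl (fun nd w =>
    (List.range (dataset.getD w []).length).foldl (fun nd z =>
      (List.range ((dataset.getD w []).getD z []).length).foldl (fun nd y =>
        (List.range (((dataset.getD w []).getD z []).getD y []).length).foldl (fun nd x =>
          pvSet4 nd (w+1) (z+1) (y+1) (x+1) ((((dataset.getD w []).getD z []).getD y []).getD x ""))
          nd) nd) nd) init

-- ===== PORT B =====
-- `cell` of Source B: bounds-checked lookup of an input cell (getD after the check = Python's in-range subscript)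
def pvCell (dataset : List (List (List (List String)))) (w z y x : Int) : String :=
  if 0 ≤ w ∧ w < (dataset.length : Int) ∧
     0 ≤ z ∧ z < ((dataset.getD w.toNat []).length : Int) ∧
     0 ≤ y ∧ y < (((dataset.getD w.toNat []).getD z.toNat []).length : Int) ∧
     0 ≤ x ∧ x < ((((dataset.getD w.toNat []).getD z.toNat []).getD y.toNat []).length : Int) then
    (((dataset.getD w.toNat []).getD z.toNat []).getD y.toNat []).getD x.toNat ""
  else "."

def copy_expand_py_alt (dataset : List (List (List (List String)))) : List (List (List (List String))) :=
  let Z := (dataset.getD 0 []).length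
  let Y := ((dataset.getD 0 []).getD 0 []).length
  let X := (((dataset.getD 0 []).getD 0 []).getD 0 []).length
  (List.range (dataset.length + 2)).map (fun (w : Nat) =>
    (List.range (Z + 2)).map (fun (z : Nat) =>
      (List.range (Y + 2)).map (fun (y : Nat) =>
        (List.range (X + 2)).map (fun (x : Nat) =>
          pvCell dataset ((w : Int) - 1) ((z : Int) - 1) ((y : Int) - 1) ((x : Int) - 1)))))

-- ===== PRECONDITION & SPEC =====
-- Pre_ is exactly the inputs on which A returns: it excludes only the inputs where A raises IndexError
-- (dataset, dataset[0] or dataset[0][0] empty so the '.'-grid sizing subscripts fail, or some existing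
-- cell whose z/y/x coordinate exceeds the corresponding dimension of dataset[0], so the copy writes out
-- of range).
def Pre_copy_expand_py (dataset : List (List (List (List String)))) : Prop :=
  dataset ≠ [] ∧ dataset.getD 0 [] ≠ [] ∧ (dataset.getD 0 []).getD 0 [] ≠ [] ∧
  ∀ s ∈ dataset, ∀ z < s.length, ∀ y < (s.getD z []).length, ∀ x < ((s.getD z []).getD y []).length,
    z ≤ (dataset.getD 0 []).length ∧ y ≤ ((dataset.getD 0 []).getD 0 []).length ∧
      x ≤ (((dataset.getD 0 []).getD 0 []).getD 0 []).length
instance (dataset : List (List (List (List String)))) : Decidable (Pre_copy_expand_py dataset) := by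
  unfold Pre_copy_expand_py; infer_instance

def pvWitness_copy_expand_py : List (List (List (List String))) := [[[["#"]]]]

def Spec_copy_expand_py (dataset : List (List (List (List String)))) (out : List (List (List (List String)))) : Prop := out = copy_expand_py_alt dataset
instance (dataset : List (List (List (List String)))) (out : List (List (List (List String)))) : Decidable (Spec_copy_expand_py dataset out) := by unfold Spec_copy_expand_py; infer_instance

-- ===== CLAIM (what is proved, stated in full; the proofs are below) =====
def Claim_equal_copy_expand_py : Prop := ∀ (dataset : List (List (List (List String)))), Dom_copy_expand_py dataset → Pre_copy_expand_py dataset → Spec_copy_expand_py dataset (copy_expand_py dataset)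

-- ===== LEMMAS AND PROOFS =====

theorem pv_modify_id {a : Type} (l : List a) (i : Nat) : l.modify i (fun t => t) = l := by
  induction l generalizing i with
  | nil => simp
  | cons h t ih => cases i <;> simp [ih]

theorem pv_modify_modify {a : Type} (l : List a) (i : Nat) (f g : a → a) :
    (l.modify i f).modify i g = l.modify i (fun t => g (f t)) := by
  induction l generalizing i with
  | nil => simp
  | cons h t ih => cases i <;> simp [ih]

-- a fold whose every step modifies the SAME index is a single modify of the folded function
theorem pv_foldl_modify {a b : Type} (xs : List b) (i : Nat) (f : b → a → a) (l : List a) :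
    xs.foldl (fun acc x => acc.modify i (f x)) l
      = l.modify i (fun t => xs.foldl (fun t x => f x t) t) := by
  induction xs generalizing l with
  | nil => simp [pv_modify_id]
  | cons x xs ih => simp [List.foldl_cons, ih, pv_modify_modify]

theorem pv_getD_modify {a : Type} (l : List a) (k j : Nat) (f : a → a) (c : a) :
    (l.modify k f).getD j c = if k = j ∧ j < l.length then f (l.getD j c) else l.getD j c := by
  induction l generalizing k j with
  | nil => simp
  | cons h t ih =>
      cases k with
      | zero => cases j with
        | zero => simp
        | succ j => simp
      | succ k => cases j with
        | zero => simp
        | succ j => simpa [ih] using by split_ifs <;> simp_all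

theorem pv_scatter_len {a : Type} (il : List Nat) (G : Nat → a → a) (t : List a) :
    (il.foldl (fun t i => t.modify (i+1) (G i)) t).length = t.length := by
  induction il generalizing t with
  | nil => rfl
  | cons i il ih => simp [List.foldl_cons, ih]

-- pointwise value of the scatter fold over a fresh border-padded level
theorem pv_scatter_getD {a b : Type} (l : List b) (d : b) (F : b → a → a) (c : a) (n : Nat)
    (j : Nat) (hj : j < n + 2) :
    ((List.range l.length).foldl (fun t i => t.modify (i+1) (F (l.getD i d))) (List.replicate (n+2) c)).getD j c
      = if 1 ≤ j ∧ j - 1 < l.length then F (l.getD (j-1) d) c else c := by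
  induction l using List.reverseRecOn with
  | nil =>
      simp only [List.length_nil, List.range_zero, List.foldl_nil]
      rw [if_neg (by omega)]
      simp [List.getD]
  | append_singleton l' e ih =>
      simp only [List.length_append, List.length_singleton]
      have hget : ∀ i < l'.length, (l' ++ [e]).getD i d = l'.getD i d := by
        intro i hi; exact List.getD_append _ _ _ _ hi
      have hlast : (l' ++ [e]).getD l'.length d = e := by simp [List.getD]
      have hstep : (List.range l'.length).foldl
            (fun t i => t.modify (i+1) (F ((l' ++ [e]).getD i d))) (List.replicate (n+2) c)
          = (List.range l'.length).foldl
            (fun t i => t.modify (i+1) (F (l'.getD i d))) (List.replicate (n+2) c) := by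
        apply PySem.List.foldl_congr_mem
        intro t i hi
        rw [hget i (List.mem_range.mp hi)]
      have hsplit : (List.range (l'.length + 1)).foldl
            (fun t i => t.modify (i+1) (F ((l' ++ [e]).getD i d))) (List.replicate (n+2) c)
          = ((List.range l'.length).foldl
              (fun t i => t.modify (i+1) (F (l'.getD i d))) (List.replicate (n+2) c)).modify
              (l'.length + 1) (F e) := by
        rw [List.range_succ, List.foldl_append, hstep, List.foldl_cons, List.foldl_nil]
        rw [hlast]
      rw [hsplit, pv_getD_modify]
      rw [pv_scatter_len, List.length_replicate]
      by_cases hk : l'.length + 1 = j ∧ j < n + 2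
      · rw [if_pos hk, ih, if_neg (by omega), if_pos (by omega)]
        have : (l' ++ [e]).getD (j-1) d = e := by
          have : j - 1 = l'.length := by omega
          rw [this, hlast]
        rw [this]
      · rw [if_neg hk, ih]
        have hne : j ≠ l'.length + 1 := by omega
        by_cases hin : 1 ≤ j ∧ j - 1 < l'.length
        · rw [if_pos hin, if_pos (by omega), hget (j-1) hin.2]
        · rw [if_neg hin, if_neg (by omega)]

theorem pv_eq_range_map {a : Type} (t : List a) (c : a) (m : Nat) (h : t.length = m) :
    t = (List.range m).map (fun j => t.getD j c) := by
  apply List.ext_getElem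
  · simp [h]
  · intro i h1 h2
    simp only [List.getElem_map, List.getElem_range]
    exact (List.getD_eq_getElem t c h1).symm

-- the scatter fold, as the map it is pointwise
theorem pv_scatter_map {a b : Type} (l : List b) (d : b) (F : b → a → a) (c : a) (n : Nat) :
    (List.range l.length).foldl (fun t i => t.modify (i+1) (F (l.getD i d))) (List.replicate (n+2) c)
      = (List.range (n+2)).map (fun j => if 1 ≤ j ∧ j - 1 < l.length then F (l.getD (j-1) d) c else c) := by
  have hlen : ((List.range l.length).foldl (fun t i => t.modify (i+1) (F (l.getD i d))) (List.replicate (n+2) c)).length = n + 2 := by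
    rw [pv_scatter_len, List.length_replicate]
  conv_lhs => rw [pv_eq_range_map _ c (n+2) hlen]
  apply List.map_congr_left
  intro j hj
  exact pv_scatter_getD l d F c n j (List.mem_range.mp hj)

-- the interior writers for one row / layer / slab, and dot levels
def pvDotRow (X : Nat) : List String := List.replicate (X + 2) "."
def pvDotLayer (X Y : Nat) : List (List String) := List.replicate (Y + 2) (pvDotRow X)
def pvDotSlab (X Y Z : Nat) : List (List (List String)) := List.replicate (Z + 2) (pvDotLayer X Y)
def pvRowW (r : List String) (t : List String) : List String :=
  (List.range r.length).foldl (fun t x => t.set (x+1) (r.getD x "")) t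
def pvLayW (l : List (List String)) (t : List (List String)) : List (List String) :=
  (List.range l.length).foldl (fun t y => t.modify (y+1) (pvRowW (l.getD y []))) t
def pvSlabW (s : List (List (List String))) (t : List (List (List String))) : List (List (List String)) :=
  (List.range s.length).foldl (fun t z => t.modify (z+1) (pvLayW (s.getD z []))) t

-- A's quadruple nested loop, with all pvSet4 modifies commuted outward
theorem pv_A_collapse (dataset : List (List (List (List String)))) (init : List (List (List (List String)))) :
    (List.range dataset.length).foldl (fun nd w =>
      (List.range (dataset.getD w []).length).foldl (fun nd z =>
        (List.range ((dataset.getD w []).getD z []).length).foldl (fun nd y =>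
          (List.range (((dataset.getD w []).getD z []).getD y []).length).foldl (fun nd x =>
            pvSet4 nd (w+1) (z+1) (y+1) (x+1) ((((dataset.getD w []).getD z []).getD y []).getD x ""))
            nd) nd) nd) init
    = (List.range dataset.length).foldl (fun nd w => nd.modify (w+1) (pvSlabW (dataset.getD w []))) init := by
  apply PySem.List.foldl_congr_mem
  intro nd w _
  unfold pvSlabW pvLayW pvRowW
  simp only [pvSet4, pv_foldl_modify]

theorem pv_row_eq (r : List String) (X : Nat) :
    pvRowW r (pvDotRow X)
      = (List.range (X+2)).map (fun x => if 1 ≤ x ∧ x - 1 < r.length then r.getD (x-1) "" else ".") := by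
  unfold pvRowW pvDotRow
  have hset : (List.range r.length).foldl (fun t x => t.set (x+1) (r.getD x "")) (List.replicate (X+2) ".")
      = (List.range r.length).foldl (fun t x => t.modify (x+1) ((fun v => fun (_ : String) => v) (r.getD x ""))) (List.replicate (X+2) ".") := by
    apply PySem.List.foldl_congr_mem
    intro t x _
    exact List.set_eq_modify _ _ _
  rw [hset, pv_scatter_map r "" (fun v (_ : String) => v) "." X]

theorem pv_lay_eq (l : List (List String)) (X Y : Nat) :
    pvLayW l (pvDotLayer X Y)
      = (List.range (Y+2)).map (fun y => if 1 ≤ y ∧ y - 1 < l.length then pvRowW (l.getD (y-1) []) (pvDotRow X) else pvDotRow X) := by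
  unfold pvLayW pvDotLayer
  rw [pv_scatter_map l [] (fun e t => pvRowW e t) (pvDotRow X) Y]

theorem pv_slab_eq (s : List (List (List String))) (X Y Z : Nat) :
    pvSlabW s (pvDotSlab X Y Z)
      = (List.range (Z+2)).map (fun z => if 1 ≤ z ∧ z - 1 < s.length then pvLayW (s.getD (z-1) []) (pvDotLayer X Y) else pvDotLayer X Y) := by
  unfold pvSlabW pvDotSlab
  rw [pv_scatter_map s [] (fun e t => pvLayW e t) (pvDotLayer X Y) Z]

-- ===== VERDICT (by name: the statement is the Claim_ definition above) =====
theorem copy_expand_py_spec : Claim_equal_copy_expand_py := by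
  intro dataset _ _
  show copy_expand_py dataset = copy_expand_py_alt dataset
  simp only [copy_expand_py, copy_expand_py_alt]
  set X := (((dataset.getD 0 []).getD 0 []).getD 0 []).length with hX
  set Y := ((dataset.getD 0 []).getD 0 []).length with hY
  set Z := (dataset.getD 0 []).length with hZ
  rw [pv_A_collapse]
  have hinit : (List.range (dataset.length + 2)).map (fun _ =>
      (List.range (Z + 2)).map (fun _ =>
        (List.range (Y + 2)).map (fun _ =>
          (List.range (X + 2)).map (fun _ => ".")))) = List.replicate (dataset.length + 2) (pvDotSlab X Y Z) := by
    simp [List.map_const', pvDotSlab, pvDotLayer, pvDotRow]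
  rw [hinit]
  have htop := pv_scatter_map dataset [] (fun e t => pvSlabW e t) (pvDotSlab X Y Z) dataset.length
  rw [htop]
  apply List.map_congr_left
  intro w hw
  have htw : ((w : Int) - 1).toNat = w - 1 := by omega
  by_cases hcw : 1 ≤ w ∧ w - 1 < dataset.length
  · rw [if_pos hcw, pv_slab_eq]
    apply List.map_congr_left
    intro z hz
    have htz : ((z : Int) - 1).toNat = z - 1 := by omega
    by_cases hcz : 1 ≤ z ∧ z - 1 < (dataset.getD (w-1) []).length
    · rw [if_pos hcz, pv_lay_eq]
      apply List.map_congr_left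
      intro y hy
      have hty : ((y : Int) - 1).toNat = y - 1 := by omega
      by_cases hcy : 1 ≤ y ∧ y - 1 < ((dataset.getD (w-1) []).getD (z-1) []).length
      · rw [if_pos hcy, pv_row_eq]
        apply List.map_congr_left
        intro x hx
        have htx : ((x : Int) - 1).toNat = x - 1 := by omega
        unfold pvCell
        rw [htw, htz, hty, htx]
        refine if_congr ?_ rfl rfl
        constructor
        · intro h; refine ⟨by omega, by omega, by omega, by omega, by omega, by omega, by omega, by omega⟩
        · intro ⟨_, _, _, _, _, _, h7, h8⟩; exact ⟨by omega, by omega⟩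
      · rw [if_neg hcy]
        have hcell : ∀ x ∈ List.range (X+2), pvCell dataset ((w : Int) - 1) ((z : Int) - 1) ((y : Int) - 1) ((x : Int) - 1) = "." := by
          intro x _
          unfold pvCell
          rw [htw, htz, hty, if_neg]
          intro ⟨_, _, _, _, h5, h6, _, _⟩
          exact hcy ⟨by omega, by omega⟩
        rw [List.map_congr_left hcell]
        simp [pvDotRow, List.map_const']
    · rw [if_neg hcz]
      have hcell : ∀ y ∈ List.range (Y+2), (List.range (X+2)).map (fun (x : Nat) =>
          pvCell dataset ((w : Int) - 1) ((z : Int) - 1) ((y : Int) - 1) ((x : Int) - 1))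
          = List.replicate (X+2) "." := by
        intro y _
        have h1 : ∀ x ∈ List.range (X+2), pvCell dataset ((w : Int) - 1) ((z : Int) - 1) ((y : Int) - 1) ((x : Int) - 1) = "." := by
          intro x _
          unfold pvCell
          rw [htw, htz, if_neg]
          intro ⟨_, _, h3, h4, _, _, _, _⟩
          exact hcz ⟨by omega, by omega⟩
        rw [List.map_congr_left h1]
        simp [List.map_const']
      rw [List.map_congr_left hcell]
      simp [pvDotLayer, pvDotRow, List.map_const']
  · rw [if_neg hcw]
    have hcell : ∀ z ∈ List.range (Z+2), (List.range (Y+2)).map (fun (y : Nat) => (List.range (X+2)).map (fun (x : Nat) =>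
        pvCell dataset ((w : Int) - 1) ((z : Int) - 1) ((y : Int) - 1) ((x : Int) - 1)))
        = List.replicate (Y+2) (List.replicate (X+2) ".") := by
      intro z _
      have h1 : ∀ y ∈ List.range (Y+2), (List.range (X+2)).map (fun (x : Nat) =>
          pvCell dataset ((w : Int) - 1) ((z : Int) - 1) ((y : Int) - 1) ((x : Int) - 1))
          = List.replicate (X+2) "." := by
        intro y _
        have h2 : ∀ x ∈ List.range (X+2), pvCell dataset ((w : Int) - 1) ((z : Int) - 1) ((y : Int) - 1) ((x : Int) - 1) = "." := by
          intro x _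
          unfold pvCell
          rw [if_neg]
          intro ⟨h1, h2, _, _, _, _, _, _⟩
          exact hcw ⟨by omega, by omega⟩
        rw [List.map_congr_left h2]
        simp [List.map_const']
      rw [List.map_congr_left h1]
      simp [List.map_const']
    rw [List.map_congr_left hcell]
    simp [pvDotSlab, pvDotLayer, pvDotRow, List.map_const']
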